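-- pv_equiv track=rewrite | github.com/Barallobre/Advent_of_Code_2022 | advent_6.py | start_of_packet
-- ===== SOURCE A (Python) =====
-- def start_of_packet(string):
--     counter = 0
--     letters_to_compare = []
--
--     mark = False
--     for character in string:
--         letters_to_compare.append(character)
--         counter = counter + 1
--         if len(letters_to_compare) == 4:
--
--             for letter in letters_to_compare:
--                 wee_chunk_1 = letters_to_compare[1:]
--                 wee_chunk_2 = letters_to_compare[:1]
--                 wee_chunk_3 = letters_to_compare[2:]
--                 wee_chunk_4 = letters_to_compare[:2]
--                 wee_chunk_5 = letters_to_compare[3:]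
--                 wee_chunk_6 = letters_to_compare[:3]
--                 if letters_to_compare[0] in wee_chunk_1:
--                     break
--                 elif (letters_to_compare[1] in wee_chunk_2
--                       or letters_to_compare[1] in wee_chunk_3):
--                     break
--                 elif (letters_to_compare[2] in wee_chunk_4
--                       or letters_to_compare[2] in wee_chunk_5):
--                     break
--                 elif letters_to_compare[3] in wee_chunk_6:
--                     break
--                 else:
--                     mark = True
--             letters_to_compare.pop(0)
--         if mark == True:
--             break
--
--     return counter
-- ===== SOURCE B (Python) =====
-- def start_of_packet(string):
--     last = {}        # last index seen for each character
--     start = 0        # left edge of the current all-distinct window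
--     for i, c in enumerate(string):
--         if c in last and last[c] >= start:
--             start = last[c] + 1
--         last[c] = i
--         if i - start + 1 == 4:
--             return i + 1
--     return len(string)
-- ===== Notes on version B (the rewrite author's own statement) =====
-- stated objective: faster
-- what changed: Replaces A's grown/popped 4-letter buffer with its inner loop and pairwise-membership elif cascade by the last-occurrence-dictionary algorithm: B keeps a dict of each character's last index and a window-start pointer that jumps past repeats, returning i+1 as soon as the window length i-start+1 reaches 4 (no per-window distinctness test at all).
import Mathlib
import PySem

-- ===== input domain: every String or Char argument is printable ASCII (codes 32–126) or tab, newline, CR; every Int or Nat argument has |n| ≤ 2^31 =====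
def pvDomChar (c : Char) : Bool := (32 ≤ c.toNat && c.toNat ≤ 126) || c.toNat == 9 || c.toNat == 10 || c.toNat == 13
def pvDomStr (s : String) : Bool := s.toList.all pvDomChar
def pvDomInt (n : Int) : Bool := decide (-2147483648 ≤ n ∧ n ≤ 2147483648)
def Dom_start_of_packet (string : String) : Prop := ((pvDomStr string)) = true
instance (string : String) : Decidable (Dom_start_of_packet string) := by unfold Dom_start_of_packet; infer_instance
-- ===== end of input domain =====

-- B replaces A's grown/popped 4-letter buffer, inner loop and pairwise elif cascade
-- by the last-occurrence-dictionary algorithm: a dict of each character's last index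
-- and a window-start pointer that jumps past repeats (different algorithm; measured faster).

-- ===== PORT A =====
-- inner 'for letter in letters_to_compare' loop: lc is letters_to_compare (length 4
-- when the loop runs, so the getD-indexing below is exact — no IndexError possible),
-- the first argument is the remaining iteration list, the Bool is 'mark'.
def sopInner (lc : List Char) : List Char → Bool → Bool
  | [], mark => mark
  | _ :: rest, mark =>
    let wee1 := PySem.List.slice lc (some 1) none        -- letters_to_compare[1:]
    let wee2 := PySem.List.slice lc none (some 1)        -- letters_to_compare[:1]
    let wee3 := PySem.List.slice lc (some 2) none        -- letters_to_compare[2:]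
    let wee4 := PySem.List.slice lc none (some 2)        -- letters_to_compare[:2]
    let wee5 := PySem.List.slice lc (some 3) none        -- letters_to_compare[3:]
    let wee6 := PySem.List.slice lc none (some 3)        -- letters_to_compare[:3]
    if wee1.contains (PySem.List.pyGetD lc 0 ' ') then mark
    else if wee2.contains (PySem.List.pyGetD lc 1 ' ') || wee3.contains (PySem.List.pyGetD lc 1 ' ') then mark
    else if wee4.contains (PySem.List.pyGetD lc 2 ' ') || wee5.contains (PySem.List.pyGetD lc 2 ' ') then mark
    else if wee6.contains (PySem.List.pyGetD lc 3 ' ') then mark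
    else sopInner lc rest true

-- outer 'for character in string' loop; state: letters_to_compare, counter.
-- 'mark' is only ever True in the iteration that breaks, so the break is returned directly.
def sopLoop : List Char → List Char → Int → Int
  | [], _, counter => counter
  | character :: rest, letters, counter =>
    let letters := letters ++ [character]
    let counter := counter + 1
    if letters.length = 4 then
      let mark := sopInner letters letters false
      -- letters_to_compare.pop(0): the list has length 4 here, so the remaining list
      -- is exactly 'drop 1' (no IndexError possible)
      let letters := letters.drop 1
      if mark then counter else sopLoop rest letters counter
    else sopLoop rest letters counter

def start_of_packet (string : String) : Int := sopLoop string.toList [] 0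

-- ===== PORT B =====
-- for i, c in enumerate(string):
--   if c in last and last[c] >= start: start = last[c] + 1
--   last[c] = i
--   if i - start + 1 == 4: return i + 1
-- return len(string)
-- state: remaining characters, i (index of the next character), last, start.
def sopBLoop : List Char → Nat → PySem.Dict Char Int → Int → Int
  | [], i, _, _ => (i : Int)
  | c :: rest, i, last, start =>
    let start := match PySem.Dict.get? last c with
      | some j => if j ≥ start then j + 1 else start
      | none => start
    let last := PySem.Dict.insert last c (i : Int)
    if (i : Int) - start + 1 = 4 then (i : Int) + 1 else sopBLoop rest (i + 1) last start

def start_of_packet_alt (string : String) : Int :=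
  sopBLoop string.toList 0 PySem.Dict.empty 0

-- ===== PRECONDITION & SPEC =====
def Spec_start_of_packet (string : String) (out : Int) : Prop := out = start_of_packet_alt string
instance (string : String) (out : Int) : Decidable (Spec_start_of_packet string out) := by unfold Spec_start_of_packet; infer_instance

-- ===== CLAIM (what is proved, stated in full; the proofs are below) =====
def Claim_equal_start_of_packet : Prop := ∀ (string : String), Dom_start_of_packet string → Spec_start_of_packet string (start_of_packet string)

-- ===== LEMMAS AND PROOFS =====

-- Proof-only middle ground between the two programs: a per-index scan that tests the
-- 4-character window ending at i for distinctness and returns i+1 at the first hit.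
def winScan (l : List Char) (i : Nat) : Int :=
  if _h : i < l.length then
    if (PySem.Set.ofList (PySem.List.slice l (some ((i - 3 : Nat) : Int)) (some ((i + 1 : Nat) : Int)))).length = 4 then
      (i : Int) + 1
    else winScan l (i + 1)
  else (l.length : Int)
termination_by l.length - i

-- A's elif cascade over a 4-letter window returns true iff the four letters are distinct;
-- so does the set-length test of winScan.
set_option maxHeartbeats 3200000 in
lemma sopInner_eq_distinct (a b c d : Char) :
    sopInner [a, b, c, d] [a, b, c, d] false
      = decide ((PySem.Set.ofList [a, b, c, d]).length = 4) := by
  by_cases hab : a = b <;> by_cases hac : a = c <;> by_cases had : a = d <;>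
    by_cases hbc : b = c <;> by_cases hbd : b = d <;> by_cases hcd : c = d <;>
    simp [sopInner, PySem.List.slice, PySem.List.pyGetD, PySem.List.pyGet?, PySem.List.pyIdx?,
      PySem.Set.ofList, PySem.Set.add, PySem.Set.contains,
      hab, hac, had, hbc, hbd, hcd] <;>
    first
      | rfl
      | (split_ifs <;> simp_all [eq_comm])

-- a list of length 4 is a literal 4-tuple
lemma len4_exists (W : List Char) (h : W.length = 4) : ∃ a b c d, W = [a, b, c, d] := by
  rcases W with _ | ⟨a, W⟩; · simp at h
  rcases W with _ | ⟨b, W⟩; · simp at h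
  rcases W with _ | ⟨c, W⟩; · simp at h
  rcases W with _ | ⟨d, W⟩; · simp at h
  rcases W with _ | ⟨e, W⟩
  · exact ⟨a, b, c, d, rfl⟩
  · simp at h

-- A-side loop invariant: after processing k characters, A's buffer is the window of the
-- last min(k,3) processed characters and its counter is k; from there A computes
-- exactly what winScan computes from index max(k,3).
lemma sopAux (l : List Char) : ∀ (m k : Nat), k ≤ l.length → l.length - k ≤ m →
    sopLoop (l.drop k) ((l.take k).drop (k - 3)) (k : Int) = winScan l (max k 3) := by
  intro m
  induction m with
  | zero =>
    intro k hk hm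
    have heq : k = l.length := by omega
    rw [heq, List.drop_length]
    rw [winScan, dif_neg (by omega)]
    simp [sopLoop]
  | succ m ih =>
    intro k hk hm
    rcases eq_or_lt_of_le hk with heq | hlt
    · rw [heq, List.drop_length]
      rw [winScan, dif_neg (by omega)]
      simp [sopLoop]
    · rw [List.drop_eq_getElem_cons hlt]
      simp only [sopLoop]
      have hcat : (l.take k).drop (k - 3) ++ [l[k]] = (l.take (k + 1)).drop (k - 3) := by
        rw [← List.take_append_getElem hlt]
        exact (List.drop_append_of_le_length (by simp; omega)).symm
      rw [hcat]
      have hlenW : ((l.take (k + 1)).drop (k - 3)).length = (k + 1) - (k - 3) := by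
        simp; omega
      by_cases hk3 : 3 ≤ k
      · obtain ⟨a, b, c, d, hW⟩ := len4_exists _ (by rw [hlenW]; omega)
        rw [hW, if_pos (by simp), sopInner_eq_distinct]
        have hmax : max k 3 = k := Nat.max_eq_left hk3
        rw [hmax, winScan, dif_pos hlt]
        have hslice : PySem.List.slice l (some ((k - 3 : Nat) : Int)) (some ((k + 1 : Nat) : Int))
            = [a, b, c, d] := by
          rw [PySem.List.slice_natCast, ← List.drop_take, hW]
        rw [hslice]
        by_cases hdis : (PySem.Set.ofList [a, b, c, d]).length = 4
        · rw [if_pos hdis, if_pos (by simp [hdis])]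
        · rw [if_neg hdis, if_neg (by simp [hdis])]
          have hnext : (l.take (k + 1)).drop ((k + 1) - 3) = [b, c, d] := by
            have h1 := congrArg (List.drop 1) hW
            rw [List.drop_drop] at h1
            rw [show (k + 1) - 3 = 1 + (k - 3) from by omega]
            first
              | exact h1
              | (rw [Nat.add_comm]; exact h1)
          have := ih (k + 1) hlt (by omega)
          rw [hnext, Nat.max_eq_left (by omega)] at this
          rw [show ((k : Int) + 1) = ((k + 1 : Nat) : Int) from by push_cast; ring]
          exact this
      · rw [if_neg (by rw [hlenW]; omega)]
        have := ih (k + 1) hlt (by omega)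
        rw [Nat.max_eq_right (by omega : k + 1 ≤ 3)] at this
        rw [show k - 3 = (k + 1) - 3 from by omega,
          show ((k : Int) + 1) = ((k + 1 : Nat) : Int) from by push_cast; ring]
        rw [Nat.max_eq_right (by omega : k ≤ 3)]
        exact this

-- -------- B-side --------

-- the last occurrence of c in p, as an index (the value B's dict holds for c)
def lastOcc : List Char → Char → Option Int
  | [], _ => none
  | a :: rest, c =>
    match lastOcc rest c with
    | some j => some (j + 1)
    | none => if a = c then some 0 else none

lemma lastOcc_append_singleton (p : List Char) (c' c : Char) :
    lastOcc (p ++ [c']) c = if c' = c then some ((p.length : Nat) : Int) else lastOcc p c := by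
  induction p with
  | nil => simp [lastOcc]
  | cons a p ih =>
    simp only [List.cons_append, lastOcc, ih]
    by_cases h : c' = c
    · simp [h]
    · simp [h]

lemma lastOcc_none (p : List Char) (c : Char) (h : lastOcc p c = none) : c ∉ p := by
  induction p with
  | nil => simp
  | cons a p ih =>
    simp only [lastOcc] at h
    rcases hp : lastOcc p c with _ | j
    · rw [hp] at h
      by_cases hac : a = c
      · simp [hac] at h
      · simp [List.mem_cons, ih hp]
        exact fun hc => hac hc.symm
    · rw [hp] at h; simp at h

lemma lastOcc_spec (p : List Char) (c : Char) (j : Int) (h : lastOcc p c = some j) :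
    0 ≤ j ∧ j.toNat < p.length ∧ p[j.toNat]? = some c := by
  induction p generalizing j with
  | nil => simp [lastOcc] at h
  | cons a p ih =>
    simp only [lastOcc] at h
    rcases hp : lastOcc p c with _ | j'
    · rw [hp] at h
      by_cases hac : a = c
      · simp [hac] at h
        subst h; simp [hac]
      · simp [hac] at h
    · rw [hp] at h
      simp only [Option.some.injEq] at h
      obtain ⟨h0, hlt, hget⟩ := ih j' hp
      subst h
      refine ⟨by omega, by simp; omega, ?_⟩
      rw [show (j' + 1).toNat = j'.toNat + 1 from by omega]
      simpa using hget

lemma lastOcc_max (p : List Char) (c : Char) (j : Int) (h : lastOcc p c = some j) :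
    c ∉ p.drop (j.toNat + 1) := by
  induction p generalizing j with
  | nil => simp
  | cons a p ih =>
    simp only [lastOcc] at h
    rcases hp : lastOcc p c with _ | j'
    · rw [hp] at h
      by_cases hac : a = c
      · simp [hac] at h
        subst h
        simpa using lastOcc_none p c hp
      · simp [hac] at h
    · rw [hp] at h
      simp only [Option.some.injEq] at h
      have h0 := (lastOcc_spec p c j' hp).1
      subst h
      rw [show (j' + 1).toNat + 1 = (j'.toNat + 1) + 1 from by omega]
      simpa using ih j' hp

-- membership from an indexed occurrence, below a drop
lemma mem_drop_of_getElem (p : List Char) (c : Char) (t j : Nat)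
    (hj : p[j]? = some c) (ht : t ≤ j) : c ∈ p.drop t := by
  have : (p.drop t)[j - t]? = some c := by
    rw [List.getElem?_drop, show t + (j - t) = j from by omega]; exact hj
  exact List.mem_of_getElem? this

-- a set built from a list has the size of the list's finset of elements
lemma setLen_eq_card (w : List Char) : (PySem.Set.ofList w).length = w.toFinset.card := by
  rw [← List.toFinset_card_of_nodup (PySem.Set.nodup_ofList w)]
  congr 1
  ext x
  simp [PySem.Set.mem_ofList]

lemma setLen_eq_four_iff (w : List Char) (hw : w.length = 4) :
    (PySem.Set.ofList w).length = 4 ↔ w.Nodup := by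
  rw [setLen_eq_card, ← hw]
  constructor
  · intro h
    have := Multiset.toFinset_card_eq_card_iff_nodup (m := (w : Multiset Char))
    simpa using this.mp (by simpa using h)
  · intro h
    exact List.toFinset_card_of_nodup h

lemma setLen_le (w : List Char) : (PySem.Set.ofList w).length ≤ w.length := by
  rw [setLen_eq_card]; exact List.toFinset_card_le w

-- B-side loop invariant: with p the processed prefix (i = p.length), B's dict holds the
-- last occurrence of every character in p, start points into p with the segment
-- p[start..] duplicate-free and every earlier cut containing a duplicate, and the
-- current window p[start..] has at most 3 characters; from such a state B's loop
-- computes exactly what winScan computes from index p.length.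
lemma sopBAux : ∀ (rest p : List Char) (d : PySem.Dict Char Int) (s : Int),
    0 ≤ s → s.toNat ≤ p.length → (p.length : Int) - s ≤ 3 →
    (p.drop s.toNat).Nodup →
    (∀ t : Nat, t < s.toNat → ¬ (p.drop t).Nodup) →
    (∀ c, d.get? c = lastOcc p c) →
    sopBLoop rest p.length d s = winScan (p ++ rest) p.length := by
  intro rest
  induction rest with
  | nil =>
    intro p d s _ _ _ _ _ _
    rw [winScan, dif_neg (by simp)]
    simp [sopBLoop]
  | cons c rest ih =>
    intro p d s hs0 hsle hwin hnd hmin hdict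
    simp only [sopBLoop, hdict c]
    -- the updated start
    set ns : Int := (match lastOcc p c with
      | some j => if j ≥ s then j + 1 else s
      | none => s) with hns
    set q : List Char := p ++ [c] with hq
    have hql : q.length = p.length + 1 := by simp [hq]
    -- basic bounds on ns
    have hns_ge : s ≤ ns := by
      rw [hns]
      rcases hoc : lastOcc p c with _ | j
      · simp
      · simp only []
        split_ifs with h
        · omega
        · omega
    have hns0 : 0 ≤ ns := le_trans hs0 hns_ge
    have hns_le : ns.toNat ≤ p.length := by
      rw [hns]
      rcases hoc : lastOcc p c with _ | j
      · simpa using hsle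
      · obtain ⟨h0, hlt, _⟩ := lastOcc_spec p c j hoc
        simp only []
        split_ifs with h
        · omega
        · simpa using hsle
    -- (H2) the new segment q[ns..] is duplicate-free
    have hseg : (q.drop ns.toNat).Nodup := by
      have hqd : q.drop ns.toNat = p.drop ns.toNat ++ [c] :=
        List.drop_append_of_le_length hns_le
      have hpn : (p.drop ns.toNat).Nodup := by
        have : p.drop ns.toNat = (p.drop s.toNat).drop (ns.toNat - s.toNat) := by
          rw [List.drop_drop]
          congr 1
          omega
        rw [this]
        exact hnd.sublist (List.drop_sublist _ _)
      have hcnot : c ∉ p.drop ns.toNat := by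
        rcases hoc : lastOcc p c with _ | j
        · intro hc
          exact lastOcc_none p c hoc (List.mem_of_mem_drop hc)
        · obtain ⟨h0, hlt, _⟩ := lastOcc_spec p c j hoc
          have hmax := lastOcc_max p c j hoc
          by_cases hjs : j ≥ s
          · have : ns = j + 1 := by rw [hns, hoc]; simp [hjs]
            rw [this, show (j + 1).toNat = j.toNat + 1 from by omega]
            exact hmax
          · have hnss : ns = s := by rw [hns, hoc]; simp [hjs]
            intro hc
            have : c ∈ p.drop (j.toNat + 1) := by
              have hdd : p.drop s.toNat = (p.drop (j.toNat + 1)).drop (s.toNat - (j.toNat + 1)) := by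
                rw [List.drop_drop]
                congr 1
                omega
              rw [hnss] at hc
              rw [hdd] at hc
              exact List.mem_of_mem_drop hc
            exact hmax this
      rw [hqd, List.nodup_append]
      refine ⟨hpn, by simp, ?_⟩
      intro a ha b hb hab
      rw [List.mem_singleton] at hb
      exact hcnot ((hab.trans hb) ▸ ha)
    -- (H3) every earlier cut of q has a duplicate
    have hmin' : ∀ t : Nat, t < ns.toNat → ¬ (q.drop t).Nodup := by
      intro t ht
      have htp : t ≤ p.length := by omega
      have hqd : q.drop t = p.drop t ++ [c] := List.drop_append_of_le_length htp
      by_cases hts : t < s.toNat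
      · intro hcon
        rw [hqd] at hcon
        exact hmin t hts (hcon.sublist (List.sublist_append_left _ _))
      · -- s.toNat ≤ t < ns.toNat: the jump case, c occurs at index j ≥ t in p
        rcases hoc : lastOcc p c with _ | j
        · exfalso
          rw [hns, hoc] at ht
          simp at ht
          omega
        · obtain ⟨h0, hlt, hget⟩ := lastOcc_spec p c j hoc
          have hjt : t ≤ j.toNat := by
            by_cases hjs : j ≥ s
            · have : ns = j + 1 := by rw [hns, hoc]; simp [hjs]
              rw [this] at ht
              omega
            · have : ns = s := by rw [hns, hoc]; simp [hjs]
              rw [this] at ht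
              omega
          have hcmem : c ∈ p.drop t := mem_drop_of_getElem p c t j.toNat hget hjt
          rw [hqd]
          intro hcon
          rw [List.nodup_append] at hcon
          exact hcon.2.2 c hcmem c (by simp) rfl
    -- (H4) the updated dict holds the last occurrences in q
    have hdict' : ∀ c', (d.insert c (p.length : Int)).get? c' = lastOcc q c' := by
      intro c'
      rw [PySem.Dict.get?_insert, hq, lastOcc_append_singleton]
      split_ifs with h1 h2 h2
      · rfl
      · exact absurd h1.symm h2
      · exact absurd h2.symm h1
      · exact hdict c'
    -- the window test of winScan at index p.length
    have hplt : p.length < q.length + rest.length := by rw [hql]; omega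
    rw [show p ++ c :: rest = q ++ rest from by simp [hq]]
    rw [winScan, dif_pos (by simpa using hplt)]
    have hslice : PySem.List.slice (q ++ rest) (some ((p.length - 3 : Nat) : Int)) (some ((p.length + 1 : Nat) : Int))
        = q.drop (p.length - 3) := by
      rw [PySem.List.slice_natCast, ← List.drop_take,
        List.take_append_of_le_length (by omega)]
      rw [show p.length + 1 = q.length from hql.symm, List.take_length]
    rw [hslice]
    have hWlen : (q.drop (p.length - 3)).length = q.length - (p.length - 3) := by simp
    -- the two conditions agree
    have hcond : ((p.length : Int) - ns + 1 = 4)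
        ↔ (PySem.Set.ofList (q.drop (p.length - 3))).length = 4 := by
      constructor
      · intro h
        have hns3 : ns.toNat = p.length - 3 := by omega
        rw [← hns3]
        have h4 : (q.drop ns.toNat).length = 4 := by
          rw [List.length_drop, hql]; omega
        exact (setLen_eq_four_iff _ h4).mpr hseg
      · intro h
        by_cases h3 : 3 ≤ p.length
        · have h4 : (q.drop (p.length - 3)).length = 4 := by rw [hWlen]; omega
          have hW : (q.drop (p.length - 3)).Nodup := (setLen_eq_four_iff _ h4).mp h
          have hle : ns.toNat ≤ p.length - 3 := by
            by_contra hcon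
            exact hmin' (p.length - 3) (by omega) hW
          omega
        · exfalso
          have := setLen_le (q.drop (p.length - 3))
          rw [hWlen] at this
          omega
    by_cases hfire : (p.length : Int) - ns + 1 = 4
    · rw [if_pos hfire, if_pos (hcond.mp hfire)]
    · rw [if_neg hfire, if_neg (fun hc => hfire (hcond.mpr hc))]
      have hwin' : (q.length : Int) - ns ≤ 3 := by
        rw [hql]
        push_cast
        omega
      have := ih q (d.insert c (p.length : Int)) ns hns0 (by omega) hwin' hseg hmin' hdict'
      rw [hql] at this
      exact this

-- winScan ignores the first three indices (their windows are shorter than 4)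
lemma winScan_step_short (l : List Char) (i : Nat) (h3 : i < 3) :
    winScan l i = winScan l (i + 1) := by
  rw [winScan]
  by_cases h : i < l.length
  · rw [dif_pos h]
    have hslice : PySem.List.slice l (some ((i - 3 : Nat) : Int)) (some ((i + 1 : Nat) : Int))
        = l.take (i + 1) := by
      rw [PySem.List.slice_natCast, show i - 3 = 0 from by omega]
      simp
    rw [hslice, if_neg]
    intro hc
    have h1 := setLen_le (l.take (i + 1))
    rw [hc] at h1
    have : (l.take (i + 1)).length ≤ i + 1 := by simp
    omega
  · rw [dif_neg h]
    rw [winScan, dif_neg (by omega)]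

-- ===== VERDICT (by name: the statement is the Claim_ definition above) =====
theorem start_of_packet_spec : Claim_equal_start_of_packet := by
  intro s _
  show start_of_packet s = start_of_packet_alt s
  have hA := sopAux s.toList s.toList.length 0 (Nat.zero_le _) (by omega)
  have hB := sopBAux s.toList [] PySem.Dict.empty 0 le_rfl (by simp) (by simp)
    (by simp) (by omega) (by intro c; simp [lastOcc, PySem.Dict.get?_empty])
  simp only [List.nil_append, List.length_nil] at hB
  have h01 := winScan_step_short s.toList 0 (by omega)
  have h12 := winScan_step_short s.toList 1 (by omega)
  have h23 := winScan_step_short s.toList 2 (by omega)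
  simp only [start_of_packet, start_of_packet_alt]
  simpa [hB, h01, h12, h23] using hA
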